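-- pv_equiv track=rewrite | github.com/NessOffice/Sync_Code | summer/groupD/odious.py | odious
-- ===== SOURCE A (Python) =====
-- def odious(num):
-- 	ans = 2 * (num - 1)
-- 	ones = 0
-- 	while(num > 0):
-- 		if(num & 1):
-- 			ones += 1
-- 		num >>= 1
-- 	if(ones & 1 == 0):
-- 		ans += 1
-- 	return ans
-- ===== SOURCE B (Python) =====
-- def odious(num):
--     # Branch-free popcount-parity via XOR bit-folding (valid for the 32-bit domain):
--     # after folding, bit 0 of n is the XOR of all bits of the original n.
--     n = num if num > 0 else 0
--     n ^= n >> 16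
--     n ^= n >> 8
--     n ^= n >> 4
--     n ^= n >> 2
--     n ^= n >> 1
--     return 2 * (num - 1) + 1 - (n & 1)
-- ===== Notes on version B (the rewrite author's own statement) =====
-- stated objective: alternative
-- what changed: Replaces the per-bit counting loop with a branch-free XOR bit-fold (n ^= n>>16 ... n ^= n>>1) that computes the popcount parity directly in a constant number of word operations, and folds the final if into arithmetic (2*(num-1)+1-parity).
import Mathlib
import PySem

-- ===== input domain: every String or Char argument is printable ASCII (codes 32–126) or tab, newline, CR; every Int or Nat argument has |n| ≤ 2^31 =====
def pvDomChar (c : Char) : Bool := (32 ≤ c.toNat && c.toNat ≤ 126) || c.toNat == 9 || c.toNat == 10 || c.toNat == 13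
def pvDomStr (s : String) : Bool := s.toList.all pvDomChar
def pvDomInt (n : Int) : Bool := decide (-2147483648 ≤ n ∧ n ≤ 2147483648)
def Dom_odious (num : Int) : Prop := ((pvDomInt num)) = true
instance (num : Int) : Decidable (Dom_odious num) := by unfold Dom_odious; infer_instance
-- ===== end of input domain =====

-- B replaces A's per-bit counting loop by a branch-free XOR bit-fold
-- (n ^= n>>16; …; n ^= n>>1) computing the popcount parity directly, and folds
-- the final `if` into arithmetic: 2*(num-1) + 1 - parity.

-- ===== PORT A =====
-- A's while loop: shift num right one bit at a time, counting odd bits.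
def odiousScan (num : Int) (ones : Int) : Int :=
  if 0 < num then
    odiousScan (num >>> (1 : Nat)) (if PySem.Int.band num 1 ≠ 0 then ones + 1 else ones)
  else ones
termination_by num.toNat
decreasing_by
  rename_i h
  obtain ⟨m, rfl⟩ : ∃ m : Nat, num = (m : Int) := ⟨num.toNat, by omega⟩
  have : ((m : Int) >>> (1 : Nat)) = ((m >>> 1 : Nat) : Int) := rfl
  rw [this]
  simp only [Int.toNat_natCast, Nat.shiftRight_eq_div_pow]
  omega

def odious (num : Int) : Int :=
  let ans := 2 * (num - 1)
  let ones := odiousScan num 0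
  let ans := if PySem.Int.band ones 1 = 0 then ans + 1 else ans
  ans

-- ===== PORT B =====
-- transliteration of Source B: clamp, five XOR folds, arithmetic finish
def odious_alt (num : Int) : Int :=
  let n := if 0 < num then num else 0
  let n := PySem.Int.bxor n (n >>> (16 : Nat))
  let n := PySem.Int.bxor n (n >>> (8 : Nat))
  let n := PySem.Int.bxor n (n >>> (4 : Nat))
  let n := PySem.Int.bxor n (n >>> (2 : Nat))
  let n := PySem.Int.bxor n (n >>> (1 : Nat))
  2 * (num - 1) + 1 - PySem.Int.band n 1

-- ===== PRECONDITION & SPEC =====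
def Spec_odious (num : Int) (out : Int) : Prop := out = odious_alt num
instance (num : Int) (out : Int) : Decidable (Spec_odious num out) := by unfold Spec_odious; infer_instance

-- ===== CLAIM =====
def Claim_equal_odious : Prop := ∀ (num : Int), Dom_odious num → Spec_odious num (odious num)

-- ===== LEMMAS AND PROOFS =====

-- reference popcount on Nat
def natPC (n : Nat) : Nat :=
  if h : 0 < n then natPC (n / 2) + n % 2 else 0
termination_by n

theorem natPC_rec (n : Nat) : natPC n = natPC (n / 2) + n % 2 := by
  rw [natPC]
  split
  · rfl
  · rename_i h
    have hn : n = 0 := by omega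
    subst hn
    rw [natPC]
    simp

theorem natPC_zero : natPC 0 = 0 := by rw [natPC]; simp

-- parity of popcount is additive under XOR
theorem natPC_xor_mod2 : ∀ x : Nat, ∀ y : Nat, natPC (x ^^^ y) % 2 = (natPC x + natPC y) % 2 := by
  intro x
  induction x using Nat.strong_induction_on with
  | _ x ih =>
    intro y
    by_cases hx : 0 < x
    · have h3 : natPC (x ^^^ y) = natPC (x / 2 ^^^ y / 2) + (x + y) % 2 := by
        rw [natPC_rec (x ^^^ y), Nat.xor_div_two, Nat.xor_mod_two_eq]
      have ihd := ih (x / 2) (by omega) (y / 2)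
      have h1 := natPC_rec x
      have h2 := natPC_rec y
      omega
    · have hx0 : x = 0 := by omega
      subst hx0
      simp [natPC_zero]

-- popcount splits over base-2^k digit concatenation
theorem natPC_split : ∀ k : Nat, ∀ a b : Nat, a < 2 ^ k → natPC (a + 2 ^ k * b) = natPC a + natPC b := by
  intro k
  induction k with
  | zero =>
    intro a b ha
    have : a = 0 := by omega
    subst this
    simp [natPC_zero]
  | succ k ih =>
    intro a b ha
    have hpow : 2 ^ (k + 1) * b = 2 * (2 ^ k * b) := by ring
    have hd : (a + 2 ^ (k + 1) * b) / 2 = a / 2 + 2 ^ k * b := by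
      rw [hpow]; omega
    have hm : (a + 2 ^ (k + 1) * b) % 2 = a % 2 := by
      rw [hpow]; omega
    have ha' : a / 2 < 2 ^ k := by
      have : (2 : Nat) ^ (k + 1) = 2 * 2 ^ k := by ring
      rw [this] at ha; omega
    rw [natPC_rec (a + 2 ^ (k + 1) * b), hd, hm, ih (a / 2) b ha', natPC_rec a]
    ring

-- one XOR-fold step halves the window while preserving the parity
theorem fold_step (k m : Nat) :
    natPC ((m ^^^ m >>> k) % 2 ^ k) % 2 = natPC (m % 2 ^ (2 * k)) % 2 := by
  have hsplit : m % 2 ^ (2 * k) = m % 2 ^ k + 2 ^ k * (m / 2 ^ k % 2 ^ k) := by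
    have : (2 : Nat) ^ (2 * k) = 2 ^ k * 2 ^ k := by rw [two_mul, pow_add]
    rw [this, Nat.mod_mul]
  rw [hsplit, natPC_split k _ _ (Nat.mod_lt _ (by positivity)),
    Nat.xor_mod_two_pow, Nat.shiftRight_eq_div_pow, natPC_xor_mod2]

-- after the five folds, bit 0 is the popcount parity (for 32-bit inputs)
theorem fold32_parity (m : Nat) (hm : m < 2 ^ 32) :
    (let n := m ^^^ m >>> 16
     let n := n ^^^ n >>> 8
     let n := n ^^^ n >>> 4
     let n := n ^^^ n >>> 2
     let n := n ^^^ n >>> 1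
     n &&& 1) = natPC m % 2 := by
  simp only []
  set n1 := m ^^^ m >>> 16 with h1
  set n2 := n1 ^^^ n1 >>> 8 with h2
  set n3 := n2 ^^^ n2 >>> 4 with h3
  set n4 := n3 ^^^ n3 >>> 2 with h4
  set n5 := n4 ^^^ n4 >>> 1 with h5
  have e1 : natPC (n1 % 2 ^ 16) % 2 = natPC m % 2 := by
    have := fold_step 16 m
    rwa [show 2 * 16 = 32 from rfl, Nat.mod_eq_of_lt hm] at this
  have e2 : natPC (n2 % 2 ^ 8) % 2 = natPC (n1 % 2 ^ 16) % 2 := fold_step 8 n1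
  have e3 : natPC (n3 % 2 ^ 4) % 2 = natPC (n2 % 2 ^ 8) % 2 := fold_step 4 n2
  have e4 : natPC (n4 % 2 ^ 2) % 2 = natPC (n3 % 2 ^ 4) % 2 := fold_step 2 n3
  have e5 : natPC (n5 % 2 ^ 1) % 2 = natPC (n4 % 2 ^ 2) % 2 := fold_step 1 n4
  have hlow : natPC (n5 % 2 ^ 1) = n5 % 2 := by
    rw [natPC_rec (n5 % 2 ^ 1)]
    have : n5 % 2 ^ 1 = n5 % 2 := by rfl
    rw [this]
    have hb : n5 % 2 / 2 = 0 := by omega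
    rw [hb, natPC_zero]
    omega
  rw [Nat.and_one_is_mod]
  omega

-- A's scan computes the popcount
theorem odiousScan_eq (num ones : Int) : odiousScan num ones = ones + (natPC num.toNat : Int) := by
  by_cases h : 0 < num
  · obtain ⟨m, rfl⟩ : ∃ m : Nat, num = (m : Int) := ⟨num.toNat, by omega⟩
    clear h
    induction m using Nat.strong_induction_on generalizing ones with
    | _ m ih =>
      rw [odiousScan]
      by_cases hm : 0 < (m : Int)
      · have hmN : 0 < m := by omega
        simp only [hm, if_pos]
        have hshift : ((m : Int) >>> (1 : Nat)) = ((m >>> 1 : Nat) : Int) := rfl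
        have hband : PySem.Int.band (m : Int) 1 = ((m &&& 1 : Nat) : Int) := by
          have := PySem.Int.band_natCast m 1
          simpa using this
        rw [hshift, ih (m >>> 1) (by simp [Nat.shiftRight_eq_div_pow]; omega), hband]
        simp only [Int.toNat_natCast, Nat.shiftRight_eq_div_pow, pow_one]
        rw [natPC_rec m]
        have h1 : m &&& 1 = m % 2 := Nat.and_one_is_mod m
        rcases Nat.mod_two_eq_zero_or_one m with he | ho
        · rw [if_neg (by simp [h1, he])]
          push_cast
          omega
        · rw [if_pos (by simp [h1, ho])]
          push_cast
          omega
      · simp only [hm, reduceIte]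
        have : m = 0 := by omega
        subst this
        simp [natPC_zero]
  · rw [odiousScan, if_neg h]
    have : num.toNat = 0 := by omega
    rw [this, natPC_zero]
    simp

-- Int-level fold step: PySem ops on a Nat cast agree with the Nat ops
theorem bxor_shift_natCast (a k : Nat) :
    PySem.Int.bxor (a : Int) ((a : Int) >>> k) = ((a ^^^ a >>> k : Nat) : Int) := by
  rw [show ((a : Int) >>> k) = ((a >>> k : Nat) : Int) from rfl, PySem.Int.bxor_natCast]

-- ===== VERDICT =====
theorem odious_spec : Claim_equal_odious := by
  intro num hdom
  have hb : num ≤ 2147483648 := by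
    simp [Dom_odious, pvDomInt] at hdom
    omega
  unfold Spec_odious odious odious_alt
  simp only []
  set m := num.toNat with hmdef
  have hmlt : m < 2 ^ 32 := by omega
  have hclamp : (if 0 < num then num else 0) = ((m : Nat) : Int) := by
    split <;> omega
  rw [hclamp, bxor_shift_natCast, bxor_shift_natCast, bxor_shift_natCast,
    bxor_shift_natCast, bxor_shift_natCast, odiousScan_eq]
  have hfold := fold32_parity m hmlt
  simp only [] at hfold
  have hbandB : PySem.Int.band
      ((((((m ^^^ m >>> 16) ^^^ (m ^^^ m >>> 16) >>> 8) ^^^ ((m ^^^ m >>> 16) ^^^ (m ^^^ m >>> 16) >>> 8) >>> 4) ^^^ (((m ^^^ m >>> 16) ^^^ (m ^^^ m >>> 16) >>> 8) ^^^ ((m ^^^ m >>> 16) ^^^ (m ^^^ m >>> 16) >>> 8) >>> 4) >>> 2) ^^^ ((((m ^^^ m >>> 16) ^^^ (m ^^^ m >>> 16) >>> 8) ^^^ ((m ^^^ m >>> 16) ^^^ (m ^^^ m >>> 16) >>> 8) >>> 4) ^^^ (((m ^^^ m >>> 16) ^^^ (m ^^^ m >>> 16) >>> 8) ^^^ ((m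 ^^^ m >>> 16) ^^^ (m ^^^ m >>> 16) >>> 8) >>> 4) >>> 2) >>> 1 : Nat) : Int) 1
      = ((natPC m % 2 : Nat) : Int) := by
    rw [show (1 : Int) = ((1 : Nat) : Int) from rfl, PySem.Int.band_natCast, hfold]
  rw [hbandB]
  have hbandA : PySem.Int.band (0 + ((natPC m : Nat) : Int)) 1 = ((natPC m % 2 : Nat) : Int) := by
    rw [zero_add, show (1 : Int) = ((1 : Nat) : Int) from rfl, PySem.Int.band_natCast,
      Nat.and_one_is_mod]
  rw [hbandA]
  rcases Nat.mod_two_eq_zero_or_one (natPC m) with h | h <;> rw [h] <;> simp
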